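-- pv_equiv track=rewrite | github.com/blaq-swan/dsa-in-python | python-primer/solutions/rev.py | reversing_sequence
-- ===== SOURCE A (Python) =====
-- def reversing_sequence(my_list):
--     rev_list = []
--     for i in range(len(my_list)):
--         for j in range(i + 1, len(my_list)):
--             my_list[i], my_list[j] = my_list[j], my_list[i]
--             x = (my_list[i], my_list[j])
--             rev_list.append(x)
--     return rev_list
-- ===== SOURCE B (Python) =====
-- def reversing_sequence(my_list):
--     # A's swap tuples are just consecutive pairs of the ORIGINAL list; its nested
--     # swaps net to a full in-place reversal, which we reproduce with .reverse().
--     orig = list(my_list)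
--     n = len(orig)
--     rev_list = [(orig[k], orig[k - 1]) for i in range(n) for k in range(1, n - i)]
--     my_list.reverse()
--     return rev_list
-- ===== Notes on version B (the rewrite author's own statement) =====
-- stated objective: simpler
-- what changed: B builds the tuple list directly as consecutive pairs of the original list via a comprehension (no element swapping at all) and reproduces A's in-place mutation with a single my_list.reverse(); A performs O(n^2) pairwise swaps and reads the mutated list.
import Mathlib
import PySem

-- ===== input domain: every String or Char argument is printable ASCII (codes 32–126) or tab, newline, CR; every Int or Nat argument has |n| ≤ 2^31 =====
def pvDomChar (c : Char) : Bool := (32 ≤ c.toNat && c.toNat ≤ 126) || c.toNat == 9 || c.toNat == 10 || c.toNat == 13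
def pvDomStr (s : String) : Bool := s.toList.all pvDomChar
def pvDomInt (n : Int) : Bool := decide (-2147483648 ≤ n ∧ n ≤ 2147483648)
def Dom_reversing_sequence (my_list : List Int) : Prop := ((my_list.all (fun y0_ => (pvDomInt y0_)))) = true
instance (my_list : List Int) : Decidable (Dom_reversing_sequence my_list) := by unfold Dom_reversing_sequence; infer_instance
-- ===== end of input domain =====

-- B builds the tuple list directly from the original values (no swapping) and reverses the
-- list once; both Pythons mutate my_list identically (full reversal) — the equivalence
-- proved here is about the RETURN value only.

-- ===== PORT A =====
-- one inner-loop body of A: swap my_list[i], my_list[j]; append (my_list[i], my_list[j])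
def swapStep (i : Int) (st : List Int × List (Int × Int)) (j : Int) : List Int × List (Int × Int) :=
  let vi := PySem.List.pyGetD st.1 i 0
  let vj := PySem.List.pyGetD st.1 j 0
  let L2 := PySem.List.pySetD (PySem.List.pySetD st.1 i vj) j vi
  (L2, st.2 ++ [(PySem.List.pyGetD L2 i 0, PySem.List.pyGetD L2 j 0)])

def reversing_sequence (my_list : List Int) : List (Int × Int) :=
  ((PySem.List.pyRange 0 (my_list.length : Int) 1).foldl
    (fun st i => (PySem.List.pyRange (i + 1) (my_list.length : Int) 1).foldl (swapStep i) st)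
    (my_list, [])).2

-- ===== PORT B =====
def reversing_sequence_alt (my_list : List Int) : List (Int × Int) :=
  (PySem.List.pyRange 0 (my_list.length : Int) 1).flatMap (fun i =>
    (PySem.List.pyRange 1 ((my_list.length : Int) - i) 1).map (fun k =>
      (PySem.List.pyGetD my_list k 0, PySem.List.pyGetD my_list (k - 1) 0)))

-- ===== PRECONDITION & SPEC =====
def Spec_reversing_sequence (my_list : List Int) (out : List (Int × Int)) : Prop := out = reversing_sequence_alt my_list
instance (my_list : List Int) (out : List (Int × Int)) : Decidable (Spec_reversing_sequence my_list out) := by unfold Spec_reversing_sequence; infer_instance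

-- ===== CLAIM (what is proved, stated in full; the proofs are below) =====
def Claim_equal_reversing_sequence : Prop := ∀ (my_list : List Int), Dom_reversing_sequence my_list → Spec_reversing_sequence my_list (reversing_sequence my_list)

-- ===== LEMMAS AND PROOFS =====

-- consecutive pairs (xs[k], xs[k-1]) of a list
def adj : List Int → List (Int × Int)
  | x :: y :: r => (y, x) :: adj (y :: r)
  | _ => []

-- concatenated stage outputs: adj (o.take m) ++ adj (o.take (m-1)) ++ … ++ adj (o.take 1)
def stagesDown (o : List Int) : Nat → List (Int × Int)
  | 0 => []
  | m + 1 => adj (o.take (m + 1)) ++ stagesDown o m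

lemma adj_snoc (xs : List Int) (y d : Int) (h : xs ≠ []) :
    adj (xs ++ [y]) = adj xs ++ [(y, xs.getLastD d)] := by
  induction xs with
  | nil => simp at h
  | cons x xs ih =>
    cases xs with
    | nil => simp [adj]
    | cons x2 r => simpa [adj] using ih (by simp)

lemma getLastD_take (t : List Int) (m : Nat) (c : Int) (h : m ≤ t.length) :
    (t.take m).getLastD c = (c :: t)[m]'(by simp; omega) := by
  induction m generalizing c t with
  | zero => simp
  | succ m ih =>
    cases t with
    | nil => simp at h
    | cons x t' =>
      rw [List.take_succ_cons, List.getLastD_cons]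
      simpa using ih t' x (by simpa using h)

-- A's inner loop rotates the tail and appends the consecutive pairs of (c :: B)
lemma inner_loop (i : Nat) (B A : List Int) (acc : List (Int × Int)) (c : Int)
    (hi : i < A.length) (hc : A[i]'hi = c) :
    ((PySem.List.pyRange (A.length : Int) ((A.length : Int) + (B.length : Int)) 1).foldl
      (swapStep (i : Int)) (A ++ B, acc))
    = (A.set i (B.getLastD c) ++ (c :: B).dropLast, acc ++ adj (c :: B)) := by
  induction B generalizing A acc c with
  | nil =>
    rw [show ((A.length : Int) + ((List.nil : List Int).length : Int)) = (A.length : Int) by simp]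
    simp [adj, ← hc, List.set_getElem_self]
  | cons b B' ih =>
    have hlt : (A.length : Int) < (A.length : Int) + ((b :: B').length : Int) := by
      have : ((b :: B').length : Int) = (B'.length : Int) + 1 := by simp
      omega
    rw [PySem.List.pyRange_one_cons hlt, List.foldl_cons]
    have g1 : PySem.List.pyGetD (A ++ b :: B') ((i : Nat) : Int) 0 = c := by
      rw [PySem.List.pyGetD_natCast]
      simp [List.getD, List.getElem?_append_left hi, List.getElem?_eq_getElem hi, hc]
    have g2 : PySem.List.pyGetD (A ++ b :: B') ((A.length : Nat) : Int) 0 = b := by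
      rw [PySem.List.pyGetD_natCast]
      simp [List.getD]
    have hstep : swapStep (i : Int) (A ++ b :: B', acc) (A.length : Int)
        = ((A.set i b ++ [c]) ++ B', acc ++ [(b, c)]) := by
      simp only [swapStep, g1, g2, PySem.List.pySetD_natCast]
      rw [List.set_append, if_pos hi, List.set_append,
        if_neg (by simp : ¬ (A.length < (A.set i b).length))]
      simp only [List.length_set, Nat.sub_self, List.set_cons_zero]
      have r1 : PySem.List.pyGetD (A.set i b ++ c :: B') ((i : Nat) : Int) 0 = b := by
        rw [PySem.List.pyGetD_natCast]
        have hi2 : i < (A.set i b).length := by simpa using hi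
        simp [List.getD, List.getElem?_append_left hi2, List.getElem?_eq_getElem hi2]
      have r2 : PySem.List.pyGetD (A.set i b ++ c :: B') ((A.length : Nat) : Int) 0 = c := by
        rw [PySem.List.pyGetD_natCast]
        simp [List.getD]
      rw [r1, r2]
      simp
    rw [hstep]
    have hi' : i < (A.set i b ++ [c]).length := by simp; omega
    have hc' : (A.set i b ++ [c])[i]'hi' = b := by
      rw [List.getElem_append_left (by simpa using hi)]
      exact List.getElem_set_self _
    have hrange : (PySem.List.pyRange ((A.length : Int) + 1)
          ((A.length : Int) + ((b :: B').length : Int)) 1)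
        = PySem.List.pyRange (((A.set i b ++ [c]).length : Int))
          (((A.set i b ++ [c]).length : Int) + ((B'.length : Nat) : Int)) 1 := by
      congr 1 <;> simp <;> ring
    rw [hrange, ih (A.set i b ++ [c]) (acc ++ [(b, c)]) b hi' hc']
    refine congrArg₂ Prod.mk ?_ ?_
    · rw [List.set_append, if_pos (by simpa using hi), List.set_set]
      simp [List.getLast?_cons]
    · simp [adj]

lemma dropLast_cons_take (c : Int) (t : List Int) (m : Nat) (h : m ≤ t.length) :
    (c :: t.take m).dropLast = (c :: t).take m := by
  induction m generalizing c t with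
  | zero => simp
  | succ m ih =>
    cases t with
    | nil => simp at h
    | cons x t' =>
      rw [List.take_succ_cons, List.dropLast_cons₂, ih x t' (by simpa using h)]
      simp

-- A's outer loop: invariant after all but m stages
lemma outer_loop (o : List Int) : ∀ (m : Nat) (acc : List (Int × Int)), m ≤ o.length →
    ((PySem.List.pyRange ((o.length - m : Nat) : Int) (o.length : Int) 1).foldl
      (fun st i => (PySem.List.pyRange (i + 1) (o.length : Int) 1).foldl (swapStep i) st)
      ((o.drop m).reverse ++ o.take m, acc))
    = (o.reverse, acc ++ stagesDown o m) := by
  intro m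
  induction m with
  | zero =>
    intro acc _
    simp [stagesDown]
  | succ m ih =>
    intro acc hm
    cases o with
    | nil => simp at hm
    | cons c t =>
      have hmt : m ≤ t.length := by simpa using hm
      simp only [List.length_cons, Nat.succ_sub_succ, List.drop_succ_cons, List.take_succ_cons] at ih ⊢
      have hlt : ((t.length - m : Nat) : Int) < ((t.length + 1 : Nat) : Int) := by
        push_cast; omega
      rw [PySem.List.pyRange_one_cons hlt]
      simp only [List.foldl_cons]
      have hi : t.length - m < ((t.drop m).reverse ++ [c]).length := by simp
      have hc : (((t.drop m).reverse ++ [c]))[t.length - m]'hi = c := by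
        rw [List.getElem_append_right (by simp)]
        simp
      have e1 : ((t.length - m : Nat) : Int) + 1 = ((((t.drop m).reverse ++ [c]).length : Nat) : Int) := by
        simp
      have e2 : ((t.length + 1 : Nat) : Int)
          = ((((t.drop m).reverse ++ [c]).length : Nat) : Int) + (((t.take m).length : Nat) : Int) := by
        simp
        omega
      have hm1 : m < (c :: t).length := by simp; omega
      have hgl : (t.take m).getLastD c = (c :: t)[m]'hm1 := getLastD_take t m c hmt
      have hinner : List.foldl (swapStep ((t.length - m : Nat) : Int))
            ((t.drop m).reverse ++ c :: t.take m, acc)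
            (PySem.List.pyRange (((t.length - m : Nat) : Int) + 1) ((t.length + 1 : Nat) : Int) 1)
          = (((c :: t).drop m).reverse ++ (c :: t).take m, acc ++ adj (c :: t.take m)) := by
        rw [e1, e2, show (t.drop m).reverse ++ c :: t.take m
              = ((t.drop m).reverse ++ [c]) ++ t.take m by simp,
          inner_loop (t.length - m) (t.take m) ((t.drop m).reverse ++ [c]) acc c hi hc]
        refine congrArg₂ Prod.mk ?_ rfl
        rw [List.set_append, if_neg (by simp), dropLast_cons_take c t m hmt, hgl,
          List.drop_eq_getElem_cons hm1]
        simp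
      rw [hinner]
      have e3 : ((t.length - m : Nat) : Int) + 1 = ((t.length + 1 - m : Nat) : Int) := by
        omega
      rw [e3, ih (acc ++ adj (c :: t.take m)) (by omega)]
      simp [stagesDown]

-- B's inner comprehension is adj of a prefix
lemma map_range_adj (o : List Int) (m : Nat) (hm : m ≤ o.length) :
    (PySem.List.pyRange 1 (m : Int) 1).map (fun k =>
      (PySem.List.pyGetD o k 0, PySem.List.pyGetD o (k - 1) 0)) = adj (o.take m) := by
  induction m with
  | zero => simp [adj]
  | succ m ih =>
    rcases Nat.eq_zero_or_pos m with h0 | hpos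
    · subst h0
      have h1 : PySem.List.pyRange 1 ((1 : Nat) : Int) 1 = [] := by
        simp
      rw [h1]
      cases o with
      | nil => simp [adj]
      | cons x t => simp [adj]
    · obtain ⟨k, rfl⟩ : ∃ k, m = k + 1 := ⟨m - 1, by omega⟩
      have hml : k + 1 < o.length := by omega
      have hsr : PySem.List.pyRange 1 (((k + 1 + 1 : Nat) : Int)) 1
          = PySem.List.pyRange 1 ((k + 1 : Nat) : Int) 1 ++ [((k + 1 : Nat) : Int)] := by
        rw [show (((k + 1 + 1 : Nat) : Int)) = ((k + 1 : Nat) : Int) + 1 by push_cast; ring]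
        exact PySem.List.pyRange_one_succ_right (by exact_mod_cast Nat.one_le_iff_ne_zero.mpr (by omega))
      rw [hsr, List.map_append, ih (by omega)]
      have htk : o.take (k + 1 + 1) = o.take (k + 1) ++ [o[k + 1]'hml] := by
        rw [List.take_add_one, List.getElem?_eq_getElem hml]
        rfl
      rw [htk, adj_snoc (o.take (k + 1)) _ 0 (by simp [List.ne_nil_iff_length_pos]; omega)]
      congr 1
      have p1 : PySem.List.pyGetD o (((k + 1 : Nat)) : Int) 0 = o[k + 1]'hml := by
        rw [PySem.List.pyGetD_natCast]
        simp [List.getD, List.getElem?_eq_getElem hml]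
      have p2 : PySem.List.pyGetD o ((((k + 1 : Nat)) : Int) - 1) 0 = (o.take (k + 1)).getLastD 0 := by
        rw [show (((k + 1 : Nat) : Int)) - 1 = ((k : Nat) : Int) by push_cast; ring,
          PySem.List.pyGetD_natCast, getLastD_take o (k + 1) 0 (by omega)]
        simp [List.getD, List.getElem?_eq_getElem (show k < o.length by omega)]
      simp only [List.map_cons, List.map_nil, p1, p2]

lemma alt_loop (o : List Int) : ∀ (m : Nat), m ≤ o.length →
    (PySem.List.pyRange ((o.length - m : Nat) : Int) (o.length : Int) 1).flatMap (fun i =>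
      (PySem.List.pyRange 1 ((o.length : Int) - i) 1).map (fun k =>
        (PySem.List.pyGetD o k 0, PySem.List.pyGetD o (k - 1) 0))) = stagesDown o m := by
  intro m
  induction m with
  | zero => simp [stagesDown]
  | succ m ih =>
    intro hm
    have hlt : ((o.length - (m + 1) : Nat) : Int) < (o.length : Int) := by omega
    rw [PySem.List.pyRange_one_cons hlt, List.flatMap_cons]
    have e1 : (o.length : Int) - ((o.length - (m + 1) : Nat) : Int) = ((m + 1 : Nat) : Int) := by
      omega
    rw [e1, map_range_adj o (m + 1) hm]
    have e2 : ((o.length - (m + 1) : Nat) : Int) + 1 = ((o.length - m : Nat) : Int) := by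
      omega
    rw [e2, ih (by omega)]
    simp [stagesDown]

lemma a_eq (o : List Int) : reversing_sequence o = stagesDown o o.length := by
  unfold reversing_sequence
  have h := outer_loop o o.length [] le_rfl
  rw [show ((o.length - o.length : Nat) : Int) = 0 by omega,
    show (o.drop o.length).reverse ++ o.take o.length = o by simp] at h
  rw [h]
  simp

lemma b_eq (o : List Int) : reversing_sequence_alt o = stagesDown o o.length := by
  unfold reversing_sequence_alt
  have h := alt_loop o o.length le_rfl
  rw [show ((o.length - o.length : Nat) : Int) = 0 by omega] at h
  exact h

-- ===== VERDICT (by name: the statement is the Claim_ definition above) =====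
theorem reversing_sequence_spec : Claim_equal_reversing_sequence := by
  intro o _
  unfold Spec_reversing_sequence
  rw [a_eq, b_eq]
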